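-- pv_equiv track=rewrite | github.com/Tho33/adventOfCode | 2024/6/getMap.py | getAllAlteredMaps
-- ===== SOURCE A (Python) =====
-- import copy
--
-- def getAllAlteredMaps(map:list, visitedLocations:list)-> list:
--     alteredMaps = []
--     mapCopied=0
--     for lineCount, lineElem in enumerate(map):
--         for columnCount, columnElem in enumerate(lineElem):
--             if([columnCount, lineCount] not in visitedLocations):
--                 continue
--             newMap = copy.deepcopy(map)
--             print ("Maps Copied : ", mapCopied)
--             mapCopied +=1
--             if ((columnElem != '#') & (columnElem != '^')):
--                 newMap[lineCount][columnCount] = '#'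
--                 alteredMaps.append(newMap)
--
--     return alteredMaps
-- ===== SOURCE B (Python) =====
-- def getAllAlteredMaps(map: list, visitedLocations: list) -> list:
--     # Drive the loop from the visited positions instead of re-scanning every
--     # grid cell: collect the distinct in-bounds positions once, sort them into
--     # row-major order, and alter the map at each one.
--     # (Side effects differ: A prints a counter and this does not; the proved
--     # equivalence is about the return value.)
--     valid = set()
--     for loc in visitedLocations:
--         if len(loc) == 2:
--             c, r = loc
--             if 0 <= r < len(map) and 0 <= c < len(map[r]):
--                 valid.add((r, c))
--     alteredMaps = []
--     for r, c in sorted(valid):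
--         cell = map[r][c]
--         if cell != '#' and cell != '^':
--             newMap = [row[:] for row in map]
--             newMap[r][c] = '#'
--             alteredMaps.append(newMap)
--     return alteredMaps
-- ===== Notes on version B (the rewrite author's own statement) =====
-- stated objective: alternative
-- what changed: Instead of scanning every grid cell and testing each against visitedLocations with a linear list-membership scan, B collects the distinct in-bounds visited positions into a set once, sorts them into row-major (row, col) order, and builds one altered map per position whose cell is neither '#' nor '^'; B also builds each altered map by copying rows instead of deep-copying and mutating.
import Mathlib
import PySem

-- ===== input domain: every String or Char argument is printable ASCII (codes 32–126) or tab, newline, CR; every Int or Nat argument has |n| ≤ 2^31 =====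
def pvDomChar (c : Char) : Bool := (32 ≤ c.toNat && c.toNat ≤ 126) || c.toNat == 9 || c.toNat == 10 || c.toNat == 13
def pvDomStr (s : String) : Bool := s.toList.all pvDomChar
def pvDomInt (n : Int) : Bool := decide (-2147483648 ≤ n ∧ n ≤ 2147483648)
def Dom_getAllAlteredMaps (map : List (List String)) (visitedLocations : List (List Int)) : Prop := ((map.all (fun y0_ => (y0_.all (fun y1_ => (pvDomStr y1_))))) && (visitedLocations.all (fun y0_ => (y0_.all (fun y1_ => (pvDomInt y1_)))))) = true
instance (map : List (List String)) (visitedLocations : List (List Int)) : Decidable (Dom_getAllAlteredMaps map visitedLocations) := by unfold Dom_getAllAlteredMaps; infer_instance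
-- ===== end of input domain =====

-- B drives the loop from the (deduplicated, row-major-sorted) visited positions instead of
-- re-scanning every grid cell; equivalence is about the RETURN value only (A also prints a
-- counter, which B does not reproduce).

-- ===== PORT A =====
-- newMap = copy.deepcopy(map); newMap[lineCount][columnCount] = '#'   (indices from enumerate: ≥ 0 and in range)
def pvAlterA (m : List (List String)) (r c : Int) : List (List String) :=
  m.set r.toNat ((m.getD r.toNat []).set c.toNat "#")

def getAllAlteredMaps (map : List (List String)) (visitedLocations : List (List Int)) : List (List (List String)) :=
  -- the print counter mapCopied only feeds 'print' and never the result; it is not threaded here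
  (PySem.List.enumerate map).foldl (fun alteredMaps le =>
    (PySem.List.enumerate le.2).foldl (fun acc ce =>
      if !(visitedLocations.contains [ce.1, le.1]) then acc   -- continue
      else if ce.2 != "#" && ce.2 != "^" then acc ++ [pvAlterA map le.1 ce.1]
      else acc) alteredMaps) []

-- ===== PORT B =====
-- the loop over visitedLocations that keeps in-bounds [c, r] as (r, c)
def pvValidPos (map : List (List String)) (vs : List (List Int)) : List (Int × Int) :=
  vs.filterMap (fun loc =>
    match loc with
    | [c, r] =>
        if 0 ≤ r ∧ r < (map.length : Int) ∧ 0 ≤ c ∧ c < ((map.getD r.toNat []).length : Int)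
        then some (r, c) else none
    | _ => none)

-- newMap = [row[:] for row in map]; newMap[r][c] = '#'
def pvAlterB (m : List (List String)) (r c : Nat) : List (List String) :=
  let nm := m.map (fun row => row)
  nm.set r ((nm.getD r []).set c "#")

def getAllAlteredMaps_alt (map : List (List String)) (visitedLocations : List (List Int)) : List (List (List String)) :=
  let valid : PySem.Set (Int × Int) := PySem.Set.ofList (pvValidPos map visitedLocations)
  -- Python's sorted on 2-tuples of ints compares lexicographically: ported with a Lex (ℤ × ℤ) key
  (PySem.List.sorted valid (fun pr => (toLex pr : Lex (Int × Int)))).foldl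
    (fun alteredMaps pr =>
      if (map.getD pr.1.toNat []).getD pr.2.toNat "" != "#"
         && (map.getD pr.1.toNat []).getD pr.2.toNat "" != "^"
      then alteredMaps ++ [pvAlterB map pr.1.toNat pr.2.toNat]
      else alteredMaps) []

-- ===== PRECONDITION & SPEC =====
def Spec_getAllAlteredMaps (map : List (List String)) (visitedLocations : List (List Int)) (out : List (List (List String))) : Prop := out = getAllAlteredMaps_alt map visitedLocations
instance (map : List (List String)) (visitedLocations : List (List Int)) (out : List (List (List String))) : Decidable (Spec_getAllAlteredMaps map visitedLocations out) := by unfold Spec_getAllAlteredMaps; infer_instance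

-- ===== CLAIM (what is proved, stated in full; the proofs are below) =====
def Claim_equal_getAllAlteredMaps : Prop := ∀ (map : List (List String)) (visitedLocations : List (List Int)), Dom_getAllAlteredMaps map visitedLocations → Spec_getAllAlteredMaps map visitedLocations (getAllAlteredMaps map visitedLocations)

-- ===== LEMMAS AND PROOFS =====

-- the row-major list of positions (r, c) whose [c, r] is visited
def pvP (map : List (List String)) (vs : List (List Int)) : List (Int × Int) :=
  (PySem.List.enumerate map).flatMap (fun le =>
    (PySem.List.enumerate le.2).filterMap (fun ce =>
      if vs.contains [ce.1, le.1] then some (le.1, ce.1) else none))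

def pvG (map : List (List String)) (pr : Int × Int) : Option (List (List String)) :=
  if (map.getD pr.1.toNat []).getD pr.2.toNat "" != "#"
     && (map.getD pr.1.toNat []).getD pr.2.toNat "" != "^"
  then some (pvAlterB map pr.1.toNat pr.2.toNat) else none

theorem pv_map_filter_eq_filterMap {α β : Type} (p : α → Bool) (f : α → β) (l : List α) :
    (l.filter p).map f = l.filterMap (fun x => if p x then some (f x) else none) := by
  induction l with
  | nil => rfl
  | cons x t ih =>
    by_cases h : p x <;> simp [h, ih]

theorem pv_filterMap_flatMap {α β γ : Type} (l : List α) (h : α → List β) (g : β → Option γ) :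
    (l.flatMap h).filterMap g = l.flatMap (fun a => (h a).filterMap g) := by
  induction l with
  | nil => rfl
  | cons x t ih => simp [List.flatMap_cons, List.filterMap_append, ih]

theorem pv_getD_eq_getElem {α : Type} (l : List α) (d : α) (n : Nat) (h : n < l.length) :
    l.getD n d = l[n] := by
  rw [List.getD_eq_getElem?_getD, List.getElem?_eq_getElem h]; rfl

theorem pv_mem_P (map : List (List String)) (vs : List (List Int)) (r c : Int) :
    (r, c) ∈ pvP map vs ↔
      (0 ≤ r ∧ r < (map.length : Int) ∧ 0 ≤ c ∧ c < ((map.getD r.toNat []).length : Int) ∧ [c, r] ∈ vs) := by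
  unfold pvP
  rw [List.mem_flatMap]
  constructor
  · rintro ⟨le, hle, hmem⟩
    rw [List.mem_filterMap] at hmem
    obtain ⟨ce, hce, hsome⟩ := hmem
    rw [PySem.List.mem_enumerate_iff] at hle
    obtain ⟨k, hk, rfl⟩ := hle
    rw [PySem.List.mem_enumerate_iff] at hce
    obtain ⟨j, hj, rfl⟩ := hce
    simp only [zero_add] at hsome hj ⊢
    split_ifs at hsome with hc
    · rw [Option.some_inj] at hsome
      obtain ⟨h1, h2⟩ := Prod.mk.injEq .. ▸ hsome
      subst h1; subst h2
      have hkn : ((k : Int)).toNat = k := Int.toNat_natCast k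
      have hgd : map.getD ((k : Int)).toNat [] = map[k] := by
        rw [hkn]; exact pv_getD_eq_getElem map [] k hk
      refine ⟨by positivity, by exact_mod_cast hk, by positivity, ?_, ?_⟩
      · rw [hgd]; exact_mod_cast hj
      · simpa using hc
  · rintro ⟨h0r, hrlen, h0c, hclen, hmem⟩
    have hkr : r.toNat < map.length := by omega
    have hgd : map.getD r.toNat [] = map[r.toNat] := pv_getD_eq_getElem map [] r.toNat hkr
    have hcj : c.toNat < (map[r.toNat]).length := by rw [hgd] at hclen; omega
    refine ⟨(r, map[r.toNat]), ?_, ?_⟩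
    · rw [PySem.List.mem_enumerate_iff]
      exact ⟨r.toNat, hkr, by simp; omega⟩
    · rw [List.mem_filterMap]
      refine ⟨(c, map[r.toNat][c.toNat]), ?_, ?_⟩
      · rw [PySem.List.mem_enumerate_iff]
        exact ⟨c.toNat, hcj, by simp; omega⟩
      · simp only []
        rw [if_pos (by simpa using hmem)]

theorem pv_mem_validPos (map : List (List String)) (vs : List (List Int)) (r c : Int) :
    (r, c) ∈ pvValidPos map vs ↔
      ([c, r] ∈ vs ∧ 0 ≤ r ∧ r < (map.length : Int) ∧ 0 ≤ c ∧ c < ((map.getD r.toNat []).length : Int)) := by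
  unfold pvValidPos
  rw [List.mem_filterMap]
  constructor
  · rintro ⟨loc, hloc, hsome⟩
    rcases loc with _ | ⟨c', _ | ⟨r', _ | ⟨x, t⟩⟩⟩
    · cases hsome
    · cases hsome
    · simp only [] at hsome
      split_ifs at hsome with hb
      · rw [Option.some_inj] at hsome
        obtain ⟨h1, h2⟩ := Prod.mk.injEq .. ▸ hsome
        subst h1; subst h2
        exact ⟨hloc, hb.1, hb.2.1, hb.2.2.1, hb.2.2.2⟩
    · cases hsome
  · rintro ⟨hmem, h1, h2, h3, h4⟩
    refine ⟨[c, r], hmem, ?_⟩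
    simp only []
    rw [if_pos ⟨h1, h2, h3, h4⟩]

theorem pv_pairwise_P (map : List (List String)) (vs : List (List Int)) :
    (pvP map vs).Pairwise (fun a b => (toLex a : Lex (Int × Int)) < toLex b) := by
  unfold pvP
  rw [List.pairwise_flatMap]
  constructor
  · intro le _
    rw [List.pairwise_filterMap]
    refine (PySem.List.pairwise_lt_enumerate le.2 0).imp ?_
    intro a b hab x hx y hy
    split_ifs at hx hy with h1 h2
    · rw [Option.some_inj] at hx hy
      subst hx; subst hy
      rw [Prod.Lex.toLex_lt_toLex]
      exact Or.inr ⟨rfl, hab⟩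
  · refine (PySem.List.pairwise_lt_enumerate map 0).imp ?_
    intro a b hab x hx y hy
    rw [List.mem_filterMap] at hx hy
    obtain ⟨ce, _, hce⟩ := hx
    obtain ⟨ce', _, hce'⟩ := hy
    split_ifs at hce hce' with h1 h2
    · rw [Option.some_inj] at hce hce'
      subst hce; subst hce'
      rw [Prod.Lex.toLex_lt_toLex]
      exact Or.inl hab

theorem pv_nodup_P (map : List (List String)) (vs : List (List Int)) : (pvP map vs).Nodup := by
  have h := pv_pairwise_P map vs
  refine List.Pairwise.imp ?_ h
  intro a b hlt heq
  exact absurd hlt (by simp [heq])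

theorem pv_sorted_eq_P (map : List (List String)) (vs : List (List Int)) :
    PySem.List.sorted (PySem.Set.ofList (pvValidPos map vs)) (fun pr => (toLex pr : Lex (Int × Int))) = pvP map vs := by
  apply PySem.List.sorted_eq_of_perm_of_pairwise_lt
  · rw [List.perm_ext_iff_of_nodup (pv_nodup_P map vs) (PySem.Set.nodup_ofList _)]
    rintro ⟨r, c⟩
    rw [pv_mem_P, PySem.Set.mem_ofList, pv_mem_validPos]
    tauto
  · exact pv_pairwise_P map vs

theorem pv_foldl_if2 {α β : Type} (p q : α → Bool) (f : α → β) (l : List α) (acc : List β) :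
    l.foldl (fun acc x => if !(p x) then acc else if q x then acc ++ [f x] else acc) acc
      = acc ++ l.filterMap (fun x => if p x && q x then some (f x) else none) := by
  induction l generalizing acc with
  | nil => simp
  | cons x t ih =>
    rw [List.foldl_cons, ih]
    by_cases h1 : p x <;> by_cases h2 : q x <;> simp [h1, h2]

theorem pv_alterAB (m : List (List String)) (k j : Nat) :
    pvAlterA m (k : Int) (j : Int) = pvAlterB m k j := by
  simp [pvAlterA, pvAlterB, List.map_id']

theorem pv_A_eq (map : List (List String)) (vs : List (List Int)) :
    getAllAlteredMaps map vs = (pvP map vs).filterMap (pvG map) := by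
  unfold getAllAlteredMaps
  rw [PySem.List.foldl_congr_mem (PySem.List.enumerate map) _
      (fun aM le => aM ++ (PySem.List.enumerate le.2).filterMap
        (fun ce => if vs.contains [ce.1, le.1] && (ce.2 != "#" && ce.2 != "^")
                   then some (pvAlterA map le.1 ce.1) else none)) []
      (fun acc le _ => pv_foldl_if2 (fun ce : Int × String => vs.contains [ce.1, le.1])
        (fun ce : Int × String => ce.2 != "#" && ce.2 != "^")
        (fun ce : Int × String => pvAlterA map le.1 ce.1) _ acc),
    PySem.List.foldl_append_eq_flatMap, List.nil_append]
  unfold pvP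
  rw [pv_filterMap_flatMap]
  apply List.flatMap_congr
  intro le hle
  rw [List.filterMap_filterMap]
  apply List.filterMap_congr
  intro ce hce
  rw [PySem.List.mem_enumerate_iff] at hle
  obtain ⟨k, hk, rfl⟩ := hle
  rw [PySem.List.mem_enumerate_iff] at hce
  obtain ⟨j, hj, rfl⟩ := hce
  simp only [zero_add] at hj ⊢
  by_cases hc : ([(j : Int), (k : Int)] ∈ vs)
  · simp [hc, pvG, Int.toNat_natCast, pv_alterAB, Option.bind,
      List.getElem?_eq_getElem hk, List.getElem?_eq_getElem hj]
  · simp [hc]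

theorem pv_B_eq (map : List (List String)) (vs : List (List Int)) :
    getAllAlteredMaps_alt map vs = (pvP map vs).filterMap (pvG map) := by
  unfold getAllAlteredMaps_alt
  simp only []
  rw [PySem.List.foldl_append_if, pv_map_filter_eq_filterMap, pv_sorted_eq_P, List.nil_append]
  rfl

-- ===== VERDICT (by name: the statement is the Claim_ definition above) =====
theorem getAllAlteredMaps_spec : Claim_equal_getAllAlteredMaps := by
  intro map vs _
  unfold Spec_getAllAlteredMaps
  rw [pv_A_eq, pv_B_eq]
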